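-- pv_equiv track=rewrite | github.com/MrCab/advent-of-code-2025 | day03/y2025-d03-p01.py | biggest_number_position_in_string
-- ===== SOURCE A (Python) =====
-- def biggest_number_position_in_string( line ) :
--   i = 0
--   biggestPos = 0
--   while i < len( line ) :
--     # only look for bigger - we want as big a follow up string as possible
--     if line[i] > line[biggestPos] :
--       biggestPos = i
--       if line[biggestPos] == '9' : #max single digit, so stop searching.
--         break
--     i += 1
--   return biggestPos
-- ===== SOURCE B (Python) =====
-- def biggest_number_position_in_string(line):
--     # two-phase: find the maximum character, then its leftmost position
--     return line.index(max(line))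
-- ===== Notes on version B (the rewrite author's own statement) =====
-- stated objective: idiomatic
-- what changed: B replaces A's interpreted per-character position-tracking while-loop (with an early break once the running maximum is '9') by the idiomatic two-phase max(line) / line.index(...), which runs in C.
-- intended difference: On nonempty strings where some '9' strictly exceeds every earlier character but a later character exceeds '9', A's digit-oriented early break returns that '9''s position while B returns the position of the true largest character, which is the intended 'biggest position'. — e.g. on biggest_number_position_in_string("19z"): A returns 1, B returns 2
-- outside the precondition, e.g. on biggest_number_position_in_string(''): A returns 0, B raises ValueError
import Mathlib
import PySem

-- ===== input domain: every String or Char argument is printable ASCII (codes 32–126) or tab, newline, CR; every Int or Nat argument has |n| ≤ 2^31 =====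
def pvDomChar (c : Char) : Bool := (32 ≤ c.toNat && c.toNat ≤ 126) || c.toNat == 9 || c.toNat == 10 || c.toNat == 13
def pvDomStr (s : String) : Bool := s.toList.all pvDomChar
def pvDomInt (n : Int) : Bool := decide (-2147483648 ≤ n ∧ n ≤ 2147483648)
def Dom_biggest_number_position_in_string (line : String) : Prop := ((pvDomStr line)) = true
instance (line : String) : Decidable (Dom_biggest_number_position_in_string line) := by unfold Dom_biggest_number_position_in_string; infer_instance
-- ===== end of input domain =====

-- B replaces A's position-tracking while-loop (early break at '9') by the idiomatic
-- two-phase max/index; on strings where that break fires before a character above '9',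
-- B returns the intended position of the true maximum (stated in D_ below).


-- ===== PORT A =====
-- while loop of A: state (i, biggestPos); in-loop indexing is always in range, so getD is exact
def pvALoop (l : List Char) (fuel i bp : Nat) : Nat :=
  match fuel with
  | 0 => bp
  | Nat.succ fuel =>
    if i < l.length then
      if l.getD bp ' ' < l.getD i ' ' then
        if l.getD i ' ' = '9' then i        -- break after biggestPos := i
        else pvALoop l fuel (i + 1) i
      else pvALoop l fuel (i + 1) bp
    else bp

def biggest_number_position_in_string (line : String) : Int :=
  (pvALoop line.toList line.toList.length 0 0 : Int)

-- ===== PORT B =====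
def biggest_number_position_in_string_alt (line : String) : Int :=
  match PySem.List.max? line.toList (fun c => c) with
  | none => 0                                -- unreachable under Pre_: Python max('') raises ValueError
  | some m => ((PySem.List.index? line.toList m).getD 0 : Int)

-- ===== PRECONDITION & SPEC =====
-- Pre_ excludes the empty string, on which A falls through to return the meaningless index 0
-- while B's max('') raises ValueError.
def Pre_biggest_number_position_in_string (line : String) : Prop := line.toList ≠ []
instance (line : String) : Decidable (Pre_biggest_number_position_in_string line) := by
  unfold Pre_biggest_number_position_in_string; infer_instance
def pvWitness_biggest_number_position_in_string : String := "ab3"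

-- On strings where a '9' strictly exceeds every earlier character but a later character
-- exceeds '9', A breaks early and returns that '9''s position; B returns the position of
-- the true maximum character, which is the intended value.
def D_biggest_number_position_in_string (line : String) : Prop :=
  line.toList.takeWhile (fun c => c < '9') ≠ [] ∧
  (line.toList.dropWhile (fun c => c < '9')).head? = some '9' ∧
  (line.toList.dropWhile (fun c => c < '9')).tail.any (fun c => '9' < c) = true
instance (line : String) : Decidable (D_biggest_number_position_in_string line) := by
  unfold D_biggest_number_position_in_string; infer_instance

def Spec_biggest_number_position_in_string (line : String) (out : Int) : Prop :=
  ¬ D_biggest_number_position_in_string line → out = biggest_number_position_in_string_alt line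
instance (line : String) (out : Int) : Decidable (Spec_biggest_number_position_in_string line out) := by
  unfold Spec_biggest_number_position_in_string; infer_instance

def pvDiffWitness_biggest_number_position_in_string : String := "19z"
def pvDiffWitnessOut_biggest_number_position_in_string : Int × Int := (1, 2)

-- ===== CLAIM (what is proved, stated in full; the proofs are below) =====
def Claim_unchanged_biggest_number_position_in_string : Prop := ∀ (line : String), Dom_biggest_number_position_in_string line → Pre_biggest_number_position_in_string line → Spec_biggest_number_position_in_string line (biggest_number_position_in_string line)
def Claim_changed_biggest_number_position_in_string : Prop := Dom_biggest_number_position_in_string (pvDiffWitness_biggest_number_position_in_string) ∧ Pre_biggest_number_position_in_string (pvDiffWitness_biggest_number_position_in_string) ∧ D_biggest_number_position_in_string (pvDiffWitness_biggest_number_position_in_string) ∧ biggest_number_position_in_string (pvDiffWitness_biggest_number_position_in_string) = pvDiffWitnessOut_biggest_number_position_in_string.1 ∧ biggest_number_position_in_string_alt (pvDiffWitness_biggest_number_position_in_string) = pvDiffWitnessOut_biggest_number_position_in_string.2 ∧ pvDiffWitnessOut_biggest_number_position_in_string.1 ≠ pvDiffWitnessOut_biggest_number_position_in_string.2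
def Claim_exact_biggest_number_position_in_string : Prop := ∀ (line : String), Dom_biggest_number_position_in_string line → Pre_biggest_number_position_in_string line → D_biggest_number_position_in_string line → biggest_number_position_in_string line ≠ biggest_number_position_in_string_alt line

-- ===== LEMMAS AND PROOFS =====

lemma pvALoop_post (l : List Char) :
    ∀ fuel i bp, l.length ≤ fuel + i → bp < l.length → bp ≤ i →
    (∀ j, j < i → l.getD j ' ' ≤ l.getD bp ' ') →
    (∀ j, j < bp → l.getD j ' ' < l.getD bp ' ') →
    (pvALoop l fuel i bp < l.length ∧
     (∀ j, j < pvALoop l fuel i bp → l.getD j ' ' < l.getD (pvALoop l fuel i bp) ' ') ∧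
     ((∀ j, j < l.length → l.getD j ' ' ≤ l.getD (pvALoop l fuel i bp) ' ') ∨
      (l.getD (pvALoop l fuel i bp) ' ' = '9' ∧ 1 ≤ pvALoop l fuel i bp))) := by
  intro fuel
  induction fuel with
  | zero =>
    intro i bp hfi hbp hbi hle hlt
    simp only [pvALoop]
    exact ⟨hbp, hlt, Or.inl fun j hj => hle j (by omega)⟩
  | succ fuel ih =>
    intro i bp hfi hbp hbi hle hlt
    simp only [pvALoop]
    by_cases hi : i < l.length
    · rw [if_pos hi]
      by_cases hc : l.getD bp ' ' < l.getD i ' '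
      · rw [if_pos hc]
        by_cases h9 : l.getD i ' ' = '9'
        · rw [if_pos h9]
          refine ⟨hi, fun j hj => lt_of_le_of_lt (hle j hj) hc, Or.inr ⟨h9, ?_⟩⟩
          rcases Nat.eq_zero_or_pos i with h0 | h0
          · exfalso; subst h0; have : bp = 0 := by omega
            subst this; exact absurd hc (lt_irrefl _)
          · exact h0
        · rw [if_neg h9]
          exact ih (i+1) i (by omega) hi (by omega)
            (fun j hj => by
              rcases Nat.lt_succ_iff_lt_or_eq.mp hj with h | h
              · exact le_of_lt (lt_of_le_of_lt (hle j h) hc)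
              · subst h; exact le_refl _)
            (fun j hj => lt_of_le_of_lt (hle j hj) hc)
      · rw [if_neg hc]
        exact ih (i+1) bp (by omega) hbp (by omega)
          (fun j hj => by
            rcases Nat.lt_succ_iff_lt_or_eq.mp hj with h | h
            · exact hle j h
            · subst h; exact le_of_not_gt hc)
          hlt
    · rw [if_neg hi]
      exact ⟨hbp, hlt, Or.inl fun j hj => hle j (by omega)⟩

-- Inside D_, A's loop started at (0,0) returns exactly the D_-witness position k.
lemma pvALoop_break (l : List Char) :
    ∀ fuel i bp, l.length ≤ fuel + i → i ≤ l.length →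
    ∀ k, i ≤ k → bp < k → k < l.length → l.getD k ' ' = '9' →
    (∀ j, j < k → l.getD j ' ' < '9') →
    pvALoop l fuel i bp = k := by
  intro fuel
  induction fuel with
  | zero => intro i bp hfi hil k hik hbk hk h9 hpre; omega
  | succ fuel ih =>
    intro i bp hfi hil k hik hbk hk h9 hpre
    have hi : i < l.length := by omega
    simp only [pvALoop, hi, if_true]
    rcases Nat.lt_or_ge i k with hik' | hik'
    · have hilt : l.getD i ' ' < '9' := hpre i hik'
      by_cases hc : l.getD bp ' ' < l.getD i ' '
      · rw [if_pos hc]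
        have h9' : l.getD i ' ' ≠ '9' := by intro h; rw [h] at hilt; exact absurd hilt (lt_irrefl _)
        rw [if_neg h9']
        exact ih (i+1) i (by omega) (by omega) k (by omega) hik' hk h9 hpre
      · rw [if_neg hc]
        exact ih (i+1) bp (by omega) (by omega) k (by omega) hbk hk h9 hpre
    · have : i = k := by omega
      subst this
      have hc : l.getD bp ' ' < l.getD i ' ' := by rw [h9]; exact hpre bp hbk
      rw [if_pos hc, if_pos h9]

-- B returns the leftmost argmax.
lemma alt_eq_of_argmax (line : String) (r : Nat) (hr : r < line.toList.length)
    (hlt : ∀ j, j < r → line.toList.getD j ' ' < line.toList.getD r ' ')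
    (hle : ∀ j, j < line.toList.length → line.toList.getD j ' ' ≤ line.toList.getD r ' ') :
    biggest_number_position_in_string_alt line = (r : Int) := by
  obtain ⟨m, hm⟩ : ∃ m, PySem.List.max? line.toList (fun c => c) = some m := by
    cases h : PySem.List.max? line.toList (fun c => c) with
    | none =>
      rw [PySem.List.max?_eq_none_iff] at h
      rw [h] at hr; simp at hr
    | some m => exact ⟨m, rfl⟩
  have hmem : m ∈ line.toList := PySem.List.max?_mem hm
  have hmax : ∀ y ∈ line.toList, y ≤ m := by
    intro y hy; exact PySem.List.max?_isMax hm y hy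
  have hmr : m = line.toList.getD r ' ' := by
    obtain ⟨j, hj, hjm⟩ := List.mem_iff_getElem.mp hmem
    have h1 : m ≤ line.toList.getD r ' ' := by
      rw [← hjm, ← List.getD_eq_getElem line.toList ' ' hj]; exact hle j hj
    have h2 : line.toList.getD r ' ' ≤ m := by
      rw [List.getD_eq_getElem line.toList ' ' hr]
      exact hmax _ (List.getElem_mem hr)
    exact le_antisymm h1 h2
  obtain ⟨k, hk⟩ : ∃ k, PySem.List.index? line.toList m = some k := by
    cases h : PySem.List.index? line.toList m with
    | none => rw [PySem.List.index?_eq_none_iff] at h; exact absurd hmem h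
    | some k => exact ⟨k, rfl⟩
  obtain ⟨hklen, hkm, hprev⟩ := PySem.List.getElem_of_index?_eq_some hk
  have hkr : k = r := by
    rcases Nat.lt_trichotomy k r with h | h | h
    · have := hlt k h
      rw [List.getD_eq_getElem line.toList ' ' hklen, hkm, hmr] at this
      exact absurd this (lt_irrefl _)
    · exact h
    · exact absurd (by rw [List.getD_eq_getElem line.toList ' ' hr] at hmr; exact hmr.symm)
        (hprev r h)
  unfold biggest_number_position_in_string_alt
  rw [hm]
  simp only []
  rw [hk]
  simp [hkr]


lemma dropWhile_eq_drop (l : List Char) :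
    ∀ r : Nat, r < l.length → (∀ j, j < r → l.getD j ' ' < '9') →
    ¬ l.getD r ' ' < '9' → l.dropWhile (fun c => c < '9') = l.drop r := by
  induction l with
  | nil => intro r hr _ _; simp at hr
  | cons c t ih =>
    intro r hr hpre hr9
    cases r with
    | zero =>
      have hc : ¬ c < '9' := by simpa using hr9
      simp [hc]
    | succ r =>
      have hc : c < '9' := by simpa using hpre 0 (Nat.succ_pos r)
      simp only [List.dropWhile_cons, List.drop_succ_cons]
      simp only [hc, decide_true, if_true]
      exact ih r (by simpa using hr) (fun j hj => by simpa using hpre (j+1) (by omega))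
        (by simpa using hr9)

lemma tw_facts (l : List Char) (r : Nat) (hr : r < l.length)
    (hpre : ∀ j, j < r → l.getD j ' ' < '9') (h9 : l.getD r ' ' = '9') :
    l.dropWhile (fun c => c < '9') = l.drop r ∧ (l.takeWhile (fun c => c < '9')).length = r := by
  have hdw : l.dropWhile (fun c => c < '9') = l.drop r :=
    dropWhile_eq_drop l r hr hpre (by rw [h9]; exact lt_irrefl _)
  refine ⟨hdw, ?_⟩
  have h := congrArg List.length (List.takeWhile_append_dropWhile (p := fun c => c < '9') (l := l))
  rw [List.length_append, hdw, List.length_drop] at h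
  omega

lemma ex_to_Dnew (l : List Char) : (∃ k ∈ List.range l.length, 1 ≤ k ∧ l.getD k ' ' = '9' ∧
    (∀ j ∈ List.range k, l.getD j ' ' < '9') ∧
    ∃ j ∈ List.range l.length, k < j ∧ '9' < l.getD j ' ') → (l.takeWhile (fun c => c < '9') ≠ [] ∧
    (l.dropWhile (fun c => c < '9')).head? = some '9' ∧
    (l.dropWhile (fun c => c < '9')).tail.any (fun c => '9' < c) = true) := by
  rintro ⟨k, hkmem, hk1, hk9, hpref, j, hjmem, hkj, hj9⟩
  rw [List.mem_range] at hkmem hjmem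
  have hpre : ∀ j', j' < k → l.getD j' ' ' < '9' :=
    fun j' hj' => hpref j' (List.mem_range.mpr hj')
  obtain ⟨hdw, htw⟩ := tw_facts l k hkmem hpre hk9
  refine ⟨?_, ?_, ?_⟩
  · intro h; rw [h] at htw; simp at htw; omega
  · rw [hdw, List.head?_drop, ← hk9, List.getD_eq_getElem l ' ' hkmem]
    simp
  · rw [hdw, List.tail_drop]
    rw [List.any_eq_true]
    refine ⟨l[j], ?_, by rw [List.getD_eq_getElem l ' ' hjmem] at hj9; exact decide_eq_true hj9⟩
    have : l[j] = (l.drop (k+1))[j - (k+1)]'(by rw [List.length_drop]; omega) := by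
      rw [List.getElem_drop]; congr 1; omega
    rw [this]; exact List.getElem_mem _
  
lemma Dnew_to_ex (l : List Char) : (l.takeWhile (fun c => c < '9') ≠ [] ∧
    (l.dropWhile (fun c => c < '9')).head? = some '9' ∧
    (l.dropWhile (fun c => c < '9')).tail.any (fun c => '9' < c) = true) → (∃ k ∈ List.range l.length, 1 ≤ k ∧ l.getD k ' ' = '9' ∧
    (∀ j ∈ List.range k, l.getD j ' ' < '9') ∧
    ∃ j ∈ List.range l.length, k < j ∧ '9' < l.getD j ' ') := by
  rintro ⟨htw, hhd, hany⟩
  set p := l.takeWhile (fun c => c < '9') with hp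
  set d := l.dropWhile (fun c => c < '9') with hd
  have hl : p ++ d = l := List.takeWhile_append_dropWhile
  obtain ⟨t, hdt⟩ : ∃ t, d = '9' :: t := by
    obtain ⟨c0, t, hct⟩ := List.exists_cons_of_ne_nil (l := d)
      (by intro h; rw [h] at hhd; simp at hhd)
    rw [hct] at hhd; simp only [List.head?_cons, Option.some.injEq] at hhd
    exact ⟨t, by rw [hct, hhd]⟩
  have hk1 : 1 ≤ p.length := List.length_pos_of_ne_nil htw
  have hlen : l.length = p.length + 1 + t.length := by
    rw [← hl, hdt, List.length_append, List.length_cons]; omega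
  refine ⟨p.length, List.mem_range.mpr (by omega), hk1, ?_, ?_, ?_⟩
  · rw [← hl, List.getD_append_right _ _ _ _ (le_refl _)]
    simp [hdt]
  · intro j hj
    rw [List.mem_range] at hj
    rw [← hl, List.getD_append _ _ _ _ hj]
    have hmem : p.getD j ' ' ∈ p := by
      rw [List.getD_eq_getElem p ' ' hj]; exact List.getElem_mem hj
    simpa using List.mem_takeWhile_imp hmem
  · rw [hdt] at hany
    simp only [List.tail_cons, List.any_eq_true] at hany
    obtain ⟨c, hcmem, hc9⟩ := hany
    obtain ⟨i, hi, hci⟩ := List.mem_iff_getElem.mp hcmem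
    refine ⟨p.length + 1 + i, List.mem_range.mpr (by omega), by omega, ?_⟩
    rw [← hl, List.getD_append_right _ _ _ _ (by omega), hdt]
    have h1 : p.length + 1 + i - p.length = i + 1 := by omega
    rw [h1, List.getD_cons_succ, List.getD_eq_getElem t ' ' hi, hci]
    exact of_decide_eq_true hc9

-- A = B whenever the break region D_ is avoided.
theorem main_spec (line : String) (hpre : line.toList ≠ [])
    (hnd : ¬ (∃ k ∈ List.range line.toList.length,
      1 ≤ k ∧ line.toList.getD k ' ' = '9' ∧
      (∀ j ∈ List.range k, line.toList.getD j ' ' < '9') ∧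
      ∃ j ∈ List.range line.toList.length, k < j ∧ '9' < line.toList.getD j ' ')) :
    (pvALoop line.toList line.toList.length 0 0 : Int) = biggest_number_position_in_string_alt line := by
  have hlen : 0 < line.toList.length := by
    cases h : line.toList with
    | nil => exact absurd h hpre
    | cons a t => simp
  obtain ⟨hrlen, hrlt, hdisj⟩ :=
    pvALoop_post line.toList line.toList.length 0 0 (by omega) hlen (le_refl 0)
      (fun j hj => absurd hj (Nat.not_lt_zero j)) (fun j hj => absurd hj (Nat.not_lt_zero j))
  set r := pvALoop line.toList line.toList.length 0 0 with hrdef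
  rcases hdisj with hle' | ⟨h9, h1⟩
  · exact (alt_eq_of_argmax line r hrlen hrlt hle').symm
  · have hle' : ∀ j, j < line.toList.length → line.toList.getD j ' ' ≤ line.toList.getD r ' ' := by
      intro j hj
      rcases Nat.lt_trichotomy j r with h | h | h
      · exact le_of_lt (hrlt j h)
      · subst h; exact le_refl _
      · by_contra hgt
        rw [not_le] at hgt
        exact hnd ⟨r, List.mem_range.mpr hrlen, h1, h9,
          fun j' hj' => by rw [← h9]; exact hrlt j' (List.mem_range.mp hj'),
          j, List.mem_range.mpr hj, h, by rw [← h9]; exact hgt⟩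
    exact (alt_eq_of_argmax line r hrlen hrlt hle').symm

-- Inside D_, A returns a position holding '9' while B's position holds a character above '9'.
theorem main_tight (line : String)
    (hd : ∃ k ∈ List.range line.toList.length,
      1 ≤ k ∧ line.toList.getD k ' ' = '9' ∧
      (∀ j ∈ List.range k, line.toList.getD j ' ' < '9') ∧
      ∃ j ∈ List.range line.toList.length, k < j ∧ '9' < line.toList.getD j ' ') :
    (pvALoop line.toList line.toList.length 0 0 : Int) ≠ biggest_number_position_in_string_alt line := by
  obtain ⟨k, hkmem, hk1, hk9, hpref, j, hjmem, hkj, hj9⟩ := hd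
  rw [List.mem_range] at hkmem hjmem
  have hA : pvALoop line.toList line.toList.length 0 0 = k :=
    pvALoop_break line.toList line.toList.length 0 0 (by omega) (by omega) k (by omega)
      (by omega) hkmem hk9 (fun j' hj' => hpref j' (List.mem_range.mpr hj'))
  obtain ⟨m, hm⟩ : ∃ m, PySem.List.max? line.toList (fun c => c) = some m := by
    cases h : PySem.List.max? line.toList (fun c => c) with
    | none =>
      rw [PySem.List.max?_eq_none_iff] at h
      rw [h] at hkmem; simp at hkmem
    | some m => exact ⟨m, rfl⟩
  have hmem : m ∈ line.toList := PySem.List.max?_mem hm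
  have hmgt : '9' < m := by
    refine lt_of_lt_of_le hj9 ?_
    rw [List.getD_eq_getElem line.toList ' ' hjmem]
    exact PySem.List.max?_isMax hm _ (List.getElem_mem hjmem)
  obtain ⟨k', hk'⟩ : ∃ k', PySem.List.index? line.toList m = some k' := by
    cases h : PySem.List.index? line.toList m with
    | none => rw [PySem.List.index?_eq_none_iff] at h; exact absurd hmem h
    | some k' => exact ⟨k', rfl⟩
  obtain ⟨hk'len, hk'm, _⟩ := PySem.List.getElem_of_index?_eq_some hk'
  have hBalt : biggest_number_position_in_string_alt line = (k' : Int) := by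
    unfold biggest_number_position_in_string_alt
    rw [hm]
    simp only []
    rw [hk']
    simp
  rw [hA, hBalt]
  intro heq
  have hkk : k = k' := by exact_mod_cast heq
  subst hkk
  rw [List.getD_eq_getElem line.toList ' ' hkmem, hk'm] at hk9
  rw [hk9] at hmgt
  exact absurd hmgt (lt_irrefl _)

-- ===== VERDICT (by name: the statement is the Claim_ definition above) =====
theorem biggest_number_position_in_string_spec : Claim_unchanged_biggest_number_position_in_string := by
  intro line _ hpre hnd
  unfold D_biggest_number_position_in_string at hnd
  exact main_spec line hpre (fun hex => hnd (ex_to_Dnew line.toList hex))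

theorem biggest_number_position_in_string_changed : Claim_changed_biggest_number_position_in_string := by
  unfold Claim_changed_biggest_number_position_in_string; decide

theorem biggest_number_position_in_string_tight : Claim_exact_biggest_number_position_in_string := by
  intro line _ _ hd
  unfold D_biggest_number_position_in_string at hd
  exact main_tight line (Dnew_to_ex line.toList hd)
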